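-- pv_equiv track=rewrite | github.com/JoJoonBalSsa/Taint-Bomb | src/main/resources/pyscripts/removeComments.py | __unify_brace_style
-- ===== SOURCE A (Python) =====
-- def __unify_brace_style(code):
--     lines = code.splitlines()
--     result = []
--     skip_next = False
--
--     for i in range(len(lines)):
--         if skip_next:
--             skip_next = False
--             continue
--
--         current_line = lines[i].rstrip()
--
--         if i + 1 < len(lines):
--             next_line = lines[i + 1].strip()
--
--             # class 선언부 패턴 확인
--             if (('class ' in current_line or 'interface ' in current_line) and
--                     not current_line.endswith('{') and
--                     next_line == '{'):
--
--                 # 클래스 선언부에 중괄호 추가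
--                 result.append(f"{current_line} {{")
--                 skip_next = True
--             else:
--                 result.append(current_line)
--         else:
--             result.append(current_line)
--
--     return '\n'.join(result)
-- ===== SOURCE B (Python) =====
-- def __unify_brace_style(code):
--     result = []
--     for line in code.splitlines():
--         r = line.rstrip()
--         if line.strip() == '{' and result:
--             prev = result[-1]
--             if ('class ' in prev or 'interface ' in prev) and not prev.endswith('{'):
--                 result[-1] = prev + ' {'
--                 continue
--         result.append(r)
--     return '\n'.join(result)
-- ===== Notes on version B (the rewrite author's own statement) =====
-- stated objective: simpler
-- what changed: Replaced the index loop with look-ahead (lines[i+1]) and a skip_next flag by a single look-back pass that appends each rstripped line and, on a standalone '{' line, merges it into result[-1] when that line is an unbraced class/interface declaration.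
import Mathlib
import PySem

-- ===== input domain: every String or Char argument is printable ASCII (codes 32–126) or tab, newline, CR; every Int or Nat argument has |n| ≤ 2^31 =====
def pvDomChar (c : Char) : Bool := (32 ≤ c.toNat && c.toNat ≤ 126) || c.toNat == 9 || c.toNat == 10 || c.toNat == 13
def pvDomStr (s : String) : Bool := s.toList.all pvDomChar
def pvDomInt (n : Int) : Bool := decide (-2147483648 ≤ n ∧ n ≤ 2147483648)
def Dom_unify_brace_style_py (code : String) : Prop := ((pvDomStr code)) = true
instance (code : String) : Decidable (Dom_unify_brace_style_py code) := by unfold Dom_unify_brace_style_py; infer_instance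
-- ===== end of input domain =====

-- B replaces A's look-ahead + skip_next flag by a single look-back pass that merges a
-- standalone '{' line into the previous accumulated line (objective: simpler).

-- ===== PORT A =====
-- A's for-loop over range(len(lines)) with the skip_next flag, transcribed as a
-- recursion over the suffix of lines, carrying skip_next; lines[i+1] is the head of rest.
def pvALoop : List String → Bool → List String
  | [], _ => []
  | _ :: rest, true => pvALoop rest false
  | x :: rest, false =>
    let cx := PySem.Str.rstrip x
    match rest with
    | [] => [cx]
    | y :: _ =>
      if (PySem.Str.isIn "class " cx || PySem.Str.isIn "interface " cx)
          && !(PySem.Str.endswith cx "{") && (PySem.Str.strip y == "{")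
      then (cx ++ " {") :: pvALoop rest true
      else cx :: pvALoop rest false

def unify_brace_style_py (code : String) : String :=
  PySem.Str.join "\n" (pvALoop (PySem.Str.splitlines code) false)

-- ===== PORT B =====
-- B's loop body: append the rstripped line, except merge a standalone '{' into
-- result[-1] when that previous line is an unbraced class/interface declaration.
def pvBStep (result : List String) (line : String) : List String :=
  let r := PySem.Str.rstrip line
  if PySem.Str.strip line == "{" then
    match result.getLast? with
    | some prev =>
      if (PySem.Str.isIn "class " prev || PySem.Str.isIn "interface " prev)
          && !(PySem.Str.endswith prev "{")
      then result.dropLast ++ [prev ++ " {"]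
      else result ++ [r]
    | none => result ++ [r]
  else result ++ [r]

def unify_brace_style_py_alt (code : String) : String :=
  PySem.Str.join "\n" ((PySem.Str.splitlines code).foldl pvBStep [])

-- ===== PRECONDITION & SPEC =====
def Spec_unify_brace_style_py (code : String) (out : String) : Prop := out = unify_brace_style_py_alt code
instance (code : String) (out : String) : Decidable (Spec_unify_brace_style_py code out) := by unfold Spec_unify_brace_style_py; infer_instance

-- ===== CLAIM (what is proved, stated in full; the proofs are below) =====
def Claim_equal_unify_brace_style_py : Prop := ∀ (code : String), Dom_unify_brace_style_py code → Spec_unify_brace_style_py code (unify_brace_style_py code)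

-- ===== LEMMAS AND PROOFS =====

-- "the previous accumulated line does not qualify for a merge": holds whenever the
-- current line is a standalone '{', by A's look-ahead (A would have merged earlier).
def pvOk (acc : List String) (x : String) : Prop :=
  (PySem.Str.strip x == "{") = true →
  ∀ p, acc.getLast? = some p →
    ((PySem.Str.isIn "class " p || PySem.Str.isIn "interface " p)
      && !(PySem.Str.endswith p "{")) = false

theorem pvEndswithBrace (s : String) : PySem.Str.endswith (s ++ " {") "{" = true := by
  simp [PySem.Chars.endswith_iff]
  exact ⟨s.toList ++ [' '], by simp⟩

theorem pvStep_append (acc : List String) (x : String) (h : pvOk acc x) :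
    pvBStep acc x = acc ++ [PySem.Str.rstrip x] := by
  simp only [pvBStep]
  by_cases hs : (PySem.Str.strip x == "{") = true
  · rw [if_pos hs]
    cases hL : acc.getLast? with
    | none => rfl
    | some p => exact if_neg (by simp only [h hs p hL, Bool.false_eq_true, not_false_eq_true])
  · rw [if_neg hs]

theorem pvKey : ∀ (n : Nat) (ls : List String), ls.length ≤ n → ∀ acc : List String,
    (∀ x xs, ls = x :: xs → pvOk acc x) →
    List.foldl pvBStep acc ls = acc ++ pvALoop ls false := by
  intro n
  induction n with
  | zero =>
    intro ls h acc _
    have : ls = [] := List.eq_nil_of_length_eq_zero (Nat.le_zero.mp h)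
    subst this; simp [pvALoop]
  | succ n ih =>
    intro ls hlen acc hok
    match ls with
    | [] => simp [pvALoop]
    | x :: rest =>
      have hstep : pvBStep acc x = acc ++ [PySem.Str.rstrip x] :=
        pvStep_append acc x (hok x rest rfl)
      match rest with
      | [] => simp [List.foldl, hstep, pvALoop]
      | y :: rest' =>
        have hA : pvALoop (x :: y :: rest') false
            = (if (PySem.Str.isIn "class " (PySem.Str.rstrip x)
                    || PySem.Str.isIn "interface " (PySem.Str.rstrip x))
                  && !(PySem.Str.endswith (PySem.Str.rstrip x) "{")
                  && (PySem.Str.strip y == "{")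
               then (PySem.Str.rstrip x ++ " {") :: pvALoop rest' false
               else PySem.Str.rstrip x :: pvALoop (y :: rest') false) := rfl
        by_cases hc : ((PySem.Str.isIn "class " (PySem.Str.rstrip x)
              || PySem.Str.isIn "interface " (PySem.Str.rstrip x))
            && !(PySem.Str.endswith (PySem.Str.rstrip x) "{")
            && (PySem.Str.strip y == "{")) = true
        · -- merge case
          have hqual := Bool.and_elim_left hc
          have hy := Bool.and_elim_right hc
          have hmerge : pvBStep (acc ++ [PySem.Str.rstrip x]) y
              = acc ++ [PySem.Str.rstrip x ++ " {"] := by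
            simp only [pvBStep, hy, if_true, List.getLast?_concat, hqual,
              List.dropLast_concat]
          have hrec : List.foldl pvBStep (acc ++ [PySem.Str.rstrip x ++ " {"]) rest'
              = (acc ++ [PySem.Str.rstrip x ++ " {"]) ++ pvALoop rest' false := by
            apply ih rest' (by simp at hlen ⊢; omega)
            intro z zs hz hstrip p hp
            rw [List.getLast?_concat] at hp
            cases hp
            simp only [pvEndswithBrace, Bool.not_true, Bool.and_false]
          calc List.foldl pvBStep acc (x :: y :: rest')
              = List.foldl pvBStep (pvBStep (pvBStep acc x) y) rest' := by
                  rw [List.foldl_cons, List.foldl_cons]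
            _ = (acc ++ [PySem.Str.rstrip x ++ " {"]) ++ pvALoop rest' false := by
                  rw [hstep, hmerge, hrec]
            _ = acc ++ pvALoop (x :: y :: rest') false := by
                  rw [hA, if_pos hc]; simp
        · -- no merge at x
          have hrec : List.foldl pvBStep (acc ++ [PySem.Str.rstrip x]) (y :: rest')
              = (acc ++ [PySem.Str.rstrip x]) ++ pvALoop (y :: rest') false := by
            apply ih (y :: rest') (by simp at hlen ⊢; omega)
            intro z zs hz hstrip p hp
            cases hz
            rw [List.getLast?_concat] at hp
            cases hp
            revert hc
            cases hq : ((PySem.Str.isIn "class " (PySem.Str.rstrip x)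
                || PySem.Str.isIn "interface " (PySem.Str.rstrip x))
              && !(PySem.Str.endswith (PySem.Str.rstrip x) "{")) with
            | false => intro _; rfl
            | true => intro hc; exact absurd (by simp [hstrip]) hc
          calc List.foldl pvBStep acc (x :: y :: rest')
              = List.foldl pvBStep (pvBStep acc x) (y :: rest') := List.foldl_cons ..
            _ = (acc ++ [PySem.Str.rstrip x]) ++ pvALoop (y :: rest') false := by
                  rw [hstep, hrec]
            _ = acc ++ pvALoop (x :: y :: rest') false := by
                  rw [hA, if_neg hc]; simp

-- ===== VERDICT (by name: the statement is the Claim_ definition above) =====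
theorem unify_brace_style_py_spec : Claim_equal_unify_brace_style_py := by
  intro code _
  show unify_brace_style_py code = unify_brace_style_py_alt code
  unfold unify_brace_style_py unify_brace_style_py_alt
  rw [pvKey (PySem.Str.splitlines code).length _ le_rfl []
      (by intro x xs _ hs p hp; simp at hp)]
  simp
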